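-- pv_equiv track=rewrite | github.com/lishnih/index | index/lib/source_funcs.py | get_source_data
-- ===== SOURCE A (Python) =====
-- def get_source_data(name, s):
--     sources = s.get('sources', [])
--     default = None
--
--     for i in sources:
--         if i[0] == name:
--             default = i
--             break
--         if i[0] == '*':
--             default = i
--
--     if default:
--         return [i if i else 'default' for i in default]
-- ===== SOURCE B (Python) =====
-- def get_source_data(name, s):
--     sources = s.get('sources', [])
--     # pass 1: first exact match (skipping malformed empty entries)
--     entry = next((i for i in sources if i and i[0] == name), None)
--     if entry is None:
--         # pass 2: last '*' fallback
--         for i in sources: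
--             if i and i[0] == '*':
--                 entry = i
--     if entry is None:
--         return None
--     return [x if x else 'default' for x in entry]
-- ===== Notes on version B (the rewrite author's own statement) =====
-- stated objective: alternative
-- what changed: Replaced A's single fused break-loop carrying a fallback accumulator by two separate passes: a first-match exact search, then (only if that fails) a last-wins scan for the '*' fallback; B also guards entries so it never indexes an empty entry.
import Mathlib
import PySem

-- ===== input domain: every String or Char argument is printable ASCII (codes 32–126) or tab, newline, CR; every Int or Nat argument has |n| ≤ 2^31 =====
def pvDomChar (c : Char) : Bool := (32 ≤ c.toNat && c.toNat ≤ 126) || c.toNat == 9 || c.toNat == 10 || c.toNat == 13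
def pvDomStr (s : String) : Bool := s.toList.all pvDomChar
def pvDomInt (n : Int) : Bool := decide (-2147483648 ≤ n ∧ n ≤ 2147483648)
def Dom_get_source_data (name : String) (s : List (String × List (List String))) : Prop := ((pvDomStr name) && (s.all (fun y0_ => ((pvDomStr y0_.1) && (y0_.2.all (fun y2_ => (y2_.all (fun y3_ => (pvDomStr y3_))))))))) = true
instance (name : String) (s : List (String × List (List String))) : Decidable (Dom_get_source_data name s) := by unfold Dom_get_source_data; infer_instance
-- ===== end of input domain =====

-- B replaces A's fused break-loop with two separate passes (exact first-match, then last-wins '*' fallback); equal value wherever A returns.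

-- ===== PORT A =====
-- the for-loop with break: carries the current `default`; i[0] ported as headD "" (exact on Pre_, where reached entries are nonempty)
def pvLoopA (name : String) : List (List String) → Option (List String) → Option (List String)
  | [], d => d
  | i :: rest, d =>
    if i.headD "" = name then some i
    else pvLoopA name rest (if i.headD "" = "*" then some i else d)

def get_source_data (name : String) (s : List (String × List (List String))) : Option (List String) :=
  match pvLoopA name ((PySem.Dict.mk s).getD "sources" []) none with
  | none => none                              -- `if default:` falsy: None
  | some l => if l.isEmpty then none          -- `if default:` falsy: empty list
              else some (l.map (fun x => if x = "" then "default" else x))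

-- ===== PORT B =====
-- pass 1: next((i for i in sources if i and i[0] == name), None)
def pvFindExact (name : String) : List (List String) → Option (List String)
  | [] => none
  | i :: rest => if i.head? = some name then some i else pvFindExact name rest

def get_source_data_alt (name : String) (s : List (String × List (List String))) : Option (List String) :=
  match (match pvFindExact name ((PySem.Dict.mk s).getD "sources" []) with
    | some e => some e
    | none => ((PySem.Dict.mk s).getD "sources" []).foldl
        (fun acc (i : List String) => if i.head? = some "*" then some i else acc) none) with  -- pass 2: last '*' wins
  | none => none
  | some e => some (e.map (fun x => if x = "" then "default" else x))

-- ===== PRECONDITION & SPEC =====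
-- Pre_ excludes exactly the inputs where A raises IndexError: an empty entry that the scan reaches
-- (i.e. an empty entry not preceded by an exact match).
def Pre_get_source_data (name : String) (s : List (String × List (List String))) : Prop :=
  ∀ j, j < ((PySem.Dict.mk s).getD "sources" []).length →
    (∀ k, k < j → ((((PySem.Dict.mk s).getD "sources" []).getD k [])).head? ≠ some name) →
    ((PySem.Dict.mk s).getD "sources" []).getD j [] ≠ []
instance (name : String) (s : List (String × List (List String))) : Decidable (Pre_get_source_data name s) := by unfold Pre_get_source_data; infer_instance

def pvWitness_get_source_data : String × (List (String × List (List String))) :=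
  ("a", [("sources", [["*", ""], ["a", "x"], []])])

def Spec_get_source_data (name : String) (s : List (String × List (List String))) (out : Option (List String)) : Prop := out = get_source_data_alt name s
instance (name : String) (s : List (String × List (List String))) (out : Option (List String)) : Decidable (Spec_get_source_data name s out) := by unfold Spec_get_source_data; infer_instance

-- ===== CLAIM (what is proved, stated in full; the proofs are below) =====
def Claim_equal_get_source_data : Prop := ∀ (name : String) (s : List (String × List (List String))), Dom_get_source_data name s → Pre_get_source_data name s → Spec_get_source_data name s (get_source_data name s)

-- ===== LEMMAS AND PROOFS =====

-- the star-fold returns its seed or a list whose head is "*"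
theorem pvStarFold_shape (l : List (List String)) (d : Option (List String)) :
    l.foldl (fun acc i => if i.head? = some "*" then some i else acc) d = d ∨
    ∃ e ∈ l, l.foldl (fun acc i => if i.head? = some "*" then some i else acc) d = some e ∧ e.head? = some "*" := by
  induction l generalizing d with
  | nil => exact Or.inl rfl
  | cons i rest ih =>
    simp only [List.foldl_cons]
    rcases ih (if i.head? = some "*" then some i else d) with h | ⟨e, he, h1, h2⟩
    · rw [h]; split_ifs at h ⊢ with hs
      · exact Or.inr ⟨i, by simp, rfl, hs⟩
      · exact Or.inl rfl
    · exact Or.inr ⟨e, by simp [he], h1, h2⟩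

-- core: under the prefix condition, A's fused loop equals B's two passes
theorem pvLoop_eq (name : String) (l : List (List String)) (d : Option (List String))
    (pre : ∀ j, j < l.length → (∀ k, k < j → (l.getD k []).head? ≠ some name) → l.getD j [] ≠ []) :
    pvLoopA name l d =
      match pvFindExact name l with
      | some e => some e
      | none => l.foldl (fun acc i => if i.head? = some "*" then some i else acc) d := by
  induction l generalizing d with
  | nil => rfl
  | cons i rest ih =>
    have hi : i ≠ [] := by
      have := pre 0 (by simp) (by intro k hk; omega)
      simpa using this
    obtain ⟨x, xs, rfl⟩ := List.exists_cons_of_ne_nil hi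
    by_cases hx : x = name
    · simp [pvLoopA, pvFindExact, hx]
    · have hpre : ∀ j, j < rest.length → (∀ k, k < j → (rest.getD k []).head? ≠ some name) → rest.getD j [] ≠ [] := by
        intro j hj hk
        have := pre (j+1) (by simpa using Nat.succ_lt_succ hj)
        simp only [List.getD_cons_succ] at this
        apply this
        intro k hk'
        cases k with
        | zero => simp [hx]
        | succ k => simp only [List.getD_cons_succ]; exact hk k (by omega)
      simp only [pvLoopA, List.headD_cons, if_neg hx, pvFindExact, List.head?_cons,
        List.foldl_cons]
      rw [ih _ hpre]
      simp only [Option.some.injEq, if_neg hx]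
      congr 1

-- ===== VERDICT (by name: the statement is the Claim_ definition above) =====
theorem get_source_data_spec : Claim_equal_get_source_data := by
  intro name s _ pre
  unfold Spec_get_source_data get_source_data get_source_data_alt
  unfold Pre_get_source_data at pre
  generalize (PySem.Dict.mk s).getD "sources" [] = sources at pre ⊢
  rw [pvLoop_eq name sources none pre]
  cases hf : pvFindExact name sources with
  | some e =>
    have he : e ≠ [] := by
      -- an exact match has a head
      clear pre
      induction sources with
      | nil => simp [pvFindExact] at hf
      | cons i rest ih =>
        simp only [pvFindExact] at hf
        split_ifs at hf with h
        · cases hf; exact fun h' => by simp [h'] at h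
        · exact ih hf
    simp [he, List.isEmpty_iff]
  | none =>
    rcases pvStarFold_shape sources none with h | ⟨e, _, h, hhd⟩
    · simp [h]
    · have he : e ≠ [] := fun h' => by simp [h'] at hhd
      simp [h, he, List.isEmpty_iff]
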